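-- pv_equiv track=rewrite | github.com/recursivelab/The-Last-Foobar | lastFoobar.py | f
-- ===== SOURCE A (Python) =====
-- def g(n):
--     if n<3:
--         return 0
--     x = n
--     n2 = n*n
--     while True:
--         xn = (x*x+n2-1)//(2*(x+n))+1
--         if xn==x:
--             return x-1
--         x = xn
--
-- def f(n):
--     s = n*(n+1)//2
--     positive = True
--     while n>=3:
--         k = g(n)
--         if positive:
--             s += k*(n-k-1)
--         else:
--             s -= k*(n-k-1)
--         positive = not positive
--         n = k
--     return s
-- ===== SOURCE B (Python) =====
-- def g(n):
--     if n < 3: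
--         return 0
--     lo, hi = n, 2*n
--     while hi - lo > 1:
--         mid = (lo + hi) // 2
--         if mid*mid <= 2*n*n:
--             lo = mid
--         else:
--             hi = mid
--     return lo - n
--
-- def terms(n):
--     if n < 3:
--         return []
--     k = g(n)
--     return [k*(n-k-1)] + terms(k)
--
-- def altsum(ts):
--     return ts[0] - altsum(ts[1:]) if ts else 0
--
-- def f(n):
--     return n*(n+1)//2 + altsum(terms(n))
-- ===== Notes on version B (the rewrite author's own statement) =====
-- stated objective: alternative
-- what changed: The Newton fixed-point iteration in the helper is replaced by a binary search for the floor square root of 2*n*n, and the stateful while-loop of f with its sign flag is replaced by a recursive decomposition: build the list of products k*(n-k-1), then fold it with a recursive alternating sum.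
import Mathlib
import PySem

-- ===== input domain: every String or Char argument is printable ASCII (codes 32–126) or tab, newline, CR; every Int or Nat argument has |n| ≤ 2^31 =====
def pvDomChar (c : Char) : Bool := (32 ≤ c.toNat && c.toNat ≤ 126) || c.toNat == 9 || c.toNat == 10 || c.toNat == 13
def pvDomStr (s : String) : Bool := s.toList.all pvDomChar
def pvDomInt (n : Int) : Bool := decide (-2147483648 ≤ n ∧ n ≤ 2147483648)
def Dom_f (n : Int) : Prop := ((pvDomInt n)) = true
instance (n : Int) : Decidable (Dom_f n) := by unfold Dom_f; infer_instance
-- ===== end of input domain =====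

-- B replaces the helper's Newton fixed-point iteration by a binary search for ⌊√(2n²)⌋
-- and replaces f's stateful sign-flag while-loop by a recursive decomposition
-- (list of products, then a recursive alternating sum); same return values.
-- ===== PORT A =====
-- while True: xn = (x*x+n2-1)//(2*(x+n))+1; if xn==x: return x-1; x = xn
-- fuel-bounded transliteration; fuel n.toNat+1 is proved sufficient below.
def gLoopA (n2 n : Int) : Nat → Int → Int
  | 0, x => x - 1
  | fuel+1, x =>
    let xn := PySem.Int.floordiv (x*x + n2 - 1) (2*(x+n)) + 1
    if xn = x then x - 1 else gLoopA n2 n fuel xn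

def gA (n : Int) : Int :=
  if n < 3 then 0 else gLoopA (n*n) n (n.toNat + 1) n

-- while n>=3: k = g(n); s ± k*(n-k-1); positive = not positive; n = k
def fLoopA : Nat → Int → Bool → Int → Int
  | 0, s, _, _ => s
  | fuel+1, s, positive, n =>
    if 3 ≤ n then
      let k := gA n
      let s' := if positive then s + k*(n-k-1) else s - k*(n-k-1)
      fLoopA fuel s' (!positive) k
    else s

def f (n : Int) : Int :=
  fLoopA (n.toNat + 1) (PySem.Int.floordiv (n*(n+1)) 2) true n

-- ===== PORT B =====
-- while hi - lo > 1: mid = (lo+hi)//2; if mid*mid <= 2*n*n: lo = mid else: hi = mid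
def bsLoop (n : Int) : Nat → Int → Int → Int
  | 0, lo, _ => lo - n
  | fuel+1, lo, hi =>
    if hi - lo > 1 then
      let mid := PySem.Int.floordiv (lo + hi) 2
      if mid*mid ≤ 2*n*n then bsLoop n fuel mid hi else bsLoop n fuel lo mid
    else lo - n

def gB (n : Int) : Int :=
  if n < 3 then 0 else bsLoop n (n.toNat + 1) n (2*n)

-- terms(n) = [] if n<3 else [k*(n-k-1)] + terms(k); fuel-bounded recursion
def termsB : Nat → Int → List Int
  | 0, _ => []
  | fuel+1, n =>
    if n < 3 then []
    else
      let k := gB n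
      k*(n-k-1) :: termsB fuel k

-- altsum(ts) = ts[0] - altsum(ts[1:]) if ts else 0
def altsum : List Int → Int
  | [] => 0
  | t :: ts => t - altsum ts

def f_alt (n : Int) : Int :=
  PySem.Int.floordiv (n*(n+1)) 2 + altsum (termsB (n.toNat + 1) n)

-- ===== PRECONDITION & SPEC =====
def Spec_f (n : Int) (out : Int) : Prop := out = f_alt n
instance (n : Int) (out : Int) : Decidable (Spec_f n out) := by unfold Spec_f; infer_instance

-- ===== CLAIM (what is proved, stated in full; the proofs are below) =====
def Claim_equal_f : Prop := ∀ (n : Int), Dom_f n → Spec_f n (f n)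

-- ===== LEMMAS AND PROOFS =====

-- √2 is irrational: 2*n*n is never a perfect square for n ≠ 0 (descent).
lemma no_sqrt_two (m : Nat) : ∀ n : Nat, n ≠ 0 → m*m ≠ 2*(n*n) := by
  induction m using Nat.strong_induction_on with
  | _ m ih =>
    intro n hn h
    obtain ⟨k, hk⟩ : ∃ k, m = 2*k := by
      rcases Nat.even_or_odd m with he | ho
      · obtain ⟨k, hk⟩ := he
        exact ⟨k, by omega⟩
      · exfalso
        obtain ⟨k, hk⟩ := ho
        have hodd : m*m = 2*(2*k*k+2*k)+1 := by subst hk; ring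
        omega
    have h4 : 4*(k*k) = 2*(n*n) := by
      have : m*m = 4*(k*k) := by subst hk; ring
      omega
    have hk0 : k ≠ 0 := by
      rintro rfl
      have hz : n*n ≠ 0 := Nat.mul_ne_zero hn hn
      omega
    have hnm : n < m := by nlinarith [Nat.pos_of_ne_zero hn, Nat.pos_of_ne_zero hk0]
    exact ih n hnm k hk0 (by omega)

lemma no_sqrt_two_int (s n : Int) (hn : 0 < n) (hs : 0 ≤ s) : s*s ≠ 2*(n*n) := by
  intro h
  apply no_sqrt_two s.toNat n.toNat (by omega)
  have h1 : ((s.toNat : Int)) = s := by omega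
  have h2 : ((n.toNat : Int)) = n := by omega
  have : ((s.toNat * s.toNat : Nat) : Int) = ((2*(n.toNat*n.toNat) : Nat) : Int) := by
    push_cast; rw [h1, h2]; linarith
  exact_mod_cast this

-- the common target value: s = ⌊√(2n²)⌋, characterised by the bracketing inequalities
def tgt (n : Int) : Int := (Nat.sqrt ((2*n*n).toNat) : Int)

lemma tgt_spec (n : Int) (hn : 3 ≤ n) :
    0 ≤ tgt n ∧ tgt n * tgt n ≤ 2*n*n ∧ 2*n*n < (tgt n + 1) * (tgt n + 1) := by
  unfold tgt
  have h0 : ((2*n*n).toNat : Int) = 2*n*n := by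
    have : 0 ≤ 2*n*n := by nlinarith
    omega
  refine ⟨by positivity, ?_, ?_⟩
  · have h := Nat.sqrt_le' ((2*n*n).toNat)
    rw [pow_two] at h
    have h' : ((Nat.sqrt ((2*n*n).toNat) * Nat.sqrt ((2*n*n).toNat) : Nat) : Int) ≤ (((2*n*n).toNat : Int)) :=
      Int.ofNat_le.mpr h
    rw [h0] at h'
    push_cast at h'
    exact h'
  · have h := Nat.lt_succ_sqrt' ((2*n*n).toNat)
    rw [pow_two] at h
    have h' : (((2*n*n).toNat : Int)) < ((Nat.succ (Nat.sqrt ((2*n*n).toNat)) * Nat.succ (Nat.sqrt ((2*n*n).toNat)) : Nat) : Int) :=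
      Int.ofNat_lt.mpr h
    rw [h0] at h'
    push_cast [Nat.succ_eq_add_one] at h'
    linarith

lemma tgt_strict (n : Int) (hn : 3 ≤ n) : tgt n * tgt n < 2*n*n := by
  obtain ⟨h0, h1, h2⟩ := tgt_spec n hn
  have hne := no_sqrt_two_int (tgt n) n (by omega) h0
  have e : (2:Int)*(n*n) = 2*n*n := by ring
  rw [e] at hne
  exact lt_of_le_of_ne h1 hne

lemma tgt_lb (n : Int) (hn : 3 ≤ n) : n ≤ tgt n := by
  obtain ⟨h0, h1, h2⟩ := tgt_spec n hn
  nlinarith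

lemma tgt_ub (n : Int) (hn : 3 ≤ n) : tgt n < 2*n := by
  obtain ⟨h0, h1, h2⟩ := tgt_spec n hn
  nlinarith

-- uniqueness of the bracketing value
lemma bracket_unique (n s : Int) (hn : 3 ≤ n) (h0 : 0 ≤ s)
    (h1 : s*s ≤ 2*n*n) (h2 : 2*n*n < (s+1)*(s+1)) : s = tgt n := by
  obtain ⟨t0, t1, t2⟩ := tgt_spec n hn
  by_contra hne
  rcases lt_or_gt_of_ne hne with h | h
  · nlinarith
  · nlinarith

-- ---- A's Newton loop converges to tgt n - n + 1, hence gA n = tgt n - n ----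

-- at the fixed point r = tgt n - n + 1 the Newton step returns r
lemma stepA_fix (n : Int) (hn : 3 ≤ n) :
    PySem.Int.floordiv ((tgt n - n + 1)*(tgt n - n + 1) + n*n - 1) (2*((tgt n - n + 1)+n)) + 1
      = tgt n - n + 1 := by
  obtain ⟨t0, t1, t2⟩ := tgt_spec n hn
  have ts := tgt_strict n hn
  have hlb := tgt_lb n hn
  have hpos : (0:Int) < 2*((tgt n - n + 1)+n) := by omega
  have : PySem.Int.floordiv ((tgt n - n + 1)*(tgt n - n + 1) + n*n - 1) (2*((tgt n - n + 1)+n)) = tgt n - n := by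
    rw [PySem.Int.floordiv_eq_iff_of_pos hpos]
    constructor
    · nlinarith
    · nlinarith
  omega

-- above the fixed point the Newton step strictly decreases and stays ≥ r
lemma stepA_desc (n x : Int) (hn : 3 ≤ n) (hx : tgt n - n + 1 < x) :
    tgt n - n + 1 ≤ PySem.Int.floordiv (x*x + n*n - 1) (2*(x+n)) + 1 ∧
    PySem.Int.floordiv (x*x + n*n - 1) (2*(x+n)) + 1 < x := by
  obtain ⟨t0, t1, t2⟩ := tgt_spec n hn
  have ts := tgt_strict n hn
  have hlb := tgt_lb n hn
  have hpos : (0:Int) < 2*(x+n) := by omega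
  constructor
  · have hlo : tgt n - n ≤ PySem.Int.floordiv (x*x + n*n - 1) (2*(x+n)) := by
      rw [PySem.Int.le_floordiv_iff_mul_le hpos]
      nlinarith [sq_nonneg (x - (tgt n - n))]
    omega
  · have hhi : PySem.Int.floordiv (x*x + n*n - 1) (2*(x+n)) < x - 1 := by
      rw [PySem.Int.floordiv_lt_iff_lt_mul hpos]
      nlinarith [sq_nonneg (x + n - 1)]
    omega

lemma gLoopA_conv (n : Int) (hn : 3 ≤ n) :
    ∀ (fuel : Nat) (x : Int), tgt n - n + 1 ≤ x → (x - (tgt n - n + 1)).toNat < fuel →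
      gLoopA (n*n) n fuel x = tgt n - n := by
  intro fuel
  induction fuel with
  | zero => intro x _ h; omega
  | succ fuel ih =>
    intro x hx hfuel
    rcases eq_or_lt_of_le hx with heq | hlt
    · subst heq
      simp only [gLoopA]
      rw [stepA_fix n hn, if_pos rfl]
      ring
    · obtain ⟨hlo, hhi⟩ := stepA_desc n x hn hlt
      simp only [gLoopA]
      rw [if_neg (by omega)]
      exact ih _ hlo (by omega)

lemma gA_eq_tgt (n : Int) (hn : 3 ≤ n) : gA n = tgt n - n := by
  unfold gA
  rw [if_neg (by omega)]
  apply gLoopA_conv n hn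
  · have := tgt_ub n hn; omega
  · have h1 := tgt_lb n hn
    have h2 := tgt_ub n hn
    omega

-- ---- B's binary search converges to the same value ----

lemma bsLoop_conv (n : Int) (hn : 3 ≤ n) :
    ∀ (fuel : Nat) (lo hi : Int), lo < hi → lo*lo ≤ 2*n*n → 2*n*n < hi*hi →
      0 ≤ lo → (hi - lo).toNat ≤ fuel + 1 →
      bsLoop n fuel lo hi = tgt n - n := by
  intro fuel
  induction fuel with
  | zero =>
    intro lo hi hlt hlo hhi hlo0 hfuel
    have h1 : hi = lo + 1 := by omega
    simp only [bsLoop]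
    subst h1
    have := bracket_unique n lo hn hlo0 hlo hhi
    omega
  | succ fuel ih =>
    intro lo hi hlt hlo hhi hlo0 hfuel
    simp only [bsLoop]
    by_cases hgap : hi - lo > 1
    · rw [if_pos hgap]
      have hmede : PySem.Int.floordiv (lo + hi) 2 = (lo + hi) / 2 :=
        PySem.Int.floordiv_eq_ediv_of_pos (by omega)
      have hmlt : lo < PySem.Int.floordiv (lo + hi) 2 ∧ PySem.Int.floordiv (lo + hi) 2 < hi := by
        rw [hmede]
        omega
      by_cases hc : PySem.Int.floordiv (lo + hi) 2 * PySem.Int.floordiv (lo + hi) 2 ≤ 2*n*n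
      · rw [if_pos hc]
        exact ih _ hi hmlt.2 hc hhi (by omega) (by omega)
      · rw [if_neg hc]
        exact ih lo _ hmlt.1 hlo (by omega) hlo0 (by omega)
    · rw [if_neg hgap]
      have h1 : hi = lo + 1 := by omega
      subst h1
      have := bracket_unique n lo hn hlo0 hlo hhi
      omega

lemma gB_eq_tgt (n : Int) (hn : 3 ≤ n) : gB n = tgt n - n := by
  unfold gB
  rw [if_neg (by omega)]
  apply bsLoop_conv n hn _ n (2*n) (by omega) (by nlinarith) (by nlinarith) (by omega)
  omega

lemma g_eq (n : Int) : gA n = gB n := by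
  by_cases h : n < 3
  · simp [gA, gB, h]
  · rw [gA_eq_tgt n (by omega), gB_eq_tgt n (by omega)]

-- A's accumulator loop equals the list-then-alternating-sum decomposition of B
lemma fLoopA_eq_altsum (fuel : Nat) : ∀ (s : Int) (positive : Bool) (n : Int),
    fLoopA fuel s positive n =
      if positive then s + altsum (termsB fuel n) else s - altsum (termsB fuel n) := by
  induction fuel with
  | zero =>
    intro s p n
    cases p <;> simp [fLoopA, termsB, altsum]
  | succ fuel ih =>
    intro s p n
    simp only [fLoopA, termsB]
    by_cases h : 3 ≤ n
    · rw [if_pos h, if_neg (by omega : ¬ n < 3), g_eq n, ih]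
      cases p <;> simp [altsum] <;> ring
    · rw [if_neg h, if_pos (by omega : n < 3)]
      cases p <;> simp [altsum]

-- ===== VERDICT (by name: the statement is the Claim_ definition above) =====
theorem f_spec : Claim_equal_f := by
  intro n _
  unfold Spec_f f f_alt
  rw [fLoopA_eq_altsum]
  simp
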